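-- pv_equiv track=rewrite | github.com/PolinaAkulova/kbig | kbig.py | kbig
-- ===== SOURCE A (Python) =====
-- def kbig(nums, k):
--     for i in nums:
--         count_more = 0          # xbckj vjvtynjd
--         for j in nums:
--             if i < j:
--                 count_more += 1
--         if count_more == k-1:   #Данное значения равняется i
--             return i
-- ===== SOURCE B (Python) =====
-- def kbig(nums, k):
--     cnt = {}
--     for x in nums:
--         cnt[x] = cnt.get(x, 0) + 1
--     greater = {}
--     running = 0
--     for v in sorted(cnt, reverse=True):
--         greater[v] = running
--         running += cnt[v]
--     for i in nums:
--         if greater[i] == k - 1: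
--             return i
-- ===== Notes on version B (the rewrite author's own statement) =====
-- stated objective: faster
-- what changed: Replaced the quadratic rescan (for each element count all strictly greater elements) by one counting dict plus one descending sort of the distinct values with a prefix-sum of counts, so each element's greater-count is a single dict lookup in the final scan.
import Mathlib
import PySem

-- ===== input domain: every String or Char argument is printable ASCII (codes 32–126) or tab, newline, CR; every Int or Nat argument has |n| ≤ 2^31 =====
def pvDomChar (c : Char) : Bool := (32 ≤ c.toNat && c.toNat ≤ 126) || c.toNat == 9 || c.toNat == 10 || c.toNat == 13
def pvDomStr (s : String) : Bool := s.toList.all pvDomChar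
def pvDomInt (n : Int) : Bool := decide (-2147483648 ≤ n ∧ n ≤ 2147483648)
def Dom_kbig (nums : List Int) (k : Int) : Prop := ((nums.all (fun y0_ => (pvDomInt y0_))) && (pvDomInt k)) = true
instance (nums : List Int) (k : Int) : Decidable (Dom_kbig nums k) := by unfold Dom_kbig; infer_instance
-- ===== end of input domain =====

-- B replaces A's quadratic per-element rescan by a counting dict + one descending
-- sort of the distinct values with prefix sums (objective: faster, O(n log n)).


-- ===== PORT A =====
-- outer 'for i in nums' with early return; inner 'for j in nums' counting loop
def kbigGo (nums : List Int) (k : Int) : List Int → Option Int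
  | [] => none
  | i :: rest =>
    let count_more : Int := nums.foldl (fun c j => if i < j then c + 1 else c) 0
    if count_more == k - 1 then some i else kbigGo nums k rest

def kbig (nums : List Int) (k : Int) : Option Int := kbigGo nums k nums

-- ===== PORT B =====
def kbig_alt (nums : List Int) (k : Int) : Option Int :=
  -- cnt[x] = cnt.get(x, 0) + 1
  let cnt : PySem.Dict Int Int :=
    nums.foldl (fun d x => d.insert x (d.getD x 0 + 1)) PySem.Dict.empty
  -- for v in sorted(cnt, reverse=True): greater[v] = running; running += cnt[v]
  let st :=
    (PySem.List.sorted cnt.keys (fun x => x) true).foldl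
      (fun (st : PySem.Dict Int Int × Int) v => (st.1.insert v st.2, st.2 + cnt.getD v 0))
      (PySem.Dict.empty, (0 : Int))
  let greater := st.1
  -- greater[i]: every i in nums is a key of cnt hence of greater, so getD is exact here
  nums.find? (fun i => greater.getD i 0 == k - 1)

-- ===== PRECONDITION & SPEC =====
def Spec_kbig (nums : List Int) (k : Int) (out : Option Int) : Prop := out = kbig_alt nums k
instance (nums : List Int) (k : Int) (out : Option Int) : Decidable (Spec_kbig nums k out) := by unfold Spec_kbig; infer_instance

-- ===== CLAIM (what is proved, stated in full; the proofs are below) =====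
def Claim_equal_kbig : Prop := ∀ (nums : List Int) (k : Int), Dom_kbig nums k → Spec_kbig nums k (kbig nums k)

-- ===== LEMMAS AND PROOFS =====

-- predicate "has exactly (k-1) strictly greater elements", as an Int count
def gtCount (nums : List Int) (i : Int) : Int := (nums.countP (fun j => decide (i < j)) : Int)

-- A's loop is find? with the rescanning count
theorem kbigGo_eq_find? (nums : List Int) (k : Int) (l : List Int) :
    kbigGo nums k l
      = l.find? (fun i => (nums.foldl (fun c j => if i < j then c + 1 else c) (0 : Int)) == k - 1) := by
  induction l with
  | nil => rfl
  | cons i rest ih =>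
    simp only [kbigGo, List.find?]
    cases h : (List.foldl (fun c j => if i < j then c + 1 else c) (0 : Int) nums == k - 1) <;>
      simp [ih]

-- the B-side prefix-sum loop
def kbStep (cnt : PySem.Dict Int Int) (st : PySem.Dict Int Int × Int) (v : Int) :
    PySem.Dict Int Int × Int := (st.1.insert v st.2, st.2 + cnt.getD v 0)

-- keys not in the remaining list never change again
theorem loop_preserve (cnt : PySem.Dict Int Int) (v : Int) :
    ∀ (t : List Int) (g : PySem.Dict Int Int) (r : Int), v ∉ t →
      ((t.foldl (kbStep cnt) (g, r)).1).getD v 0 = g.getD v 0 := by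
  intro t
  induction t with
  | nil => intro g r _; rfl
  | cons w t' ih =>
    intro g r hv
    have hvw : v ≠ w := fun h => hv (h ▸ List.mem_cons_self)
    have hvt : v ∉ t' := fun h => hv (List.mem_cons_of_mem _ h)
    simp only [List.foldl_cons, kbStep]
    rw [ih _ _ hvt, PySem.Dict.getD_insert]
    simp [hvw]

-- countP arithmetic: removing the head of the membership complement
theorem countP_cons_split (nums : List Int) (v : Int) (t : List Int) (hv : v ∉ t) :
    nums.countP (fun j => !decide (j ∈ (v :: t))) + nums.count v
      = nums.countP (fun j => !decide (j ∈ t)) := by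
  induction nums with
  | nil => rfl
  | cons a nums ih =>
    rw [List.countP_cons, List.countP_cons, List.count_cons]
    by_cases hav : a = v
    · have e1 : (!decide (a ∈ (v :: t))) = false := by subst hav; simp
      have e2 : (!decide (a ∈ t)) = true := by subst hav; simp [hv]
      have e3 : (a == v) = true := by subst hav; simp
      rw [e1, e2, e3]
      simp only [if_false, if_true, Bool.false_eq_true]
      omega
    · have e1 : (!decide (a ∈ (v :: t))) = (!decide (a ∈ t)) := by simp [hav]
      have e3 : (a == v) = false := by simp [hav]
      rw [e1, e3]
      simp only [Bool.false_eq_true, if_false]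
      split_ifs <;> omega

-- main invariant of the prefix-sum loop
theorem loop_main (nums : List Int) (cnt : PySem.Dict Int Int)
    (hcnt : ∀ v, cnt.getD v 0 = (nums.count v : Int)) :
    ∀ (ks : List Int) (g : PySem.Dict Int Int) (r : Int),
      ks.Pairwise (· > ·) →
      (∀ j, j ∈ nums → j ∉ ks → ∀ u ∈ ks, u < j) →
      r = (nums.countP (fun j => !decide (j ∈ ks)) : Int) →
      ∀ v ∈ ks, ((ks.foldl (kbStep cnt) (g, r)).1).getD v 0 = gtCount nums v := by
  intro ks
  induction ks with
  | nil => intro g r _ _ _ v hv; cases hv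
  | cons w t ih =>
    intro g r hpair hcompl hr v hv
    have hwt : w ∉ t := by
      intro h
      exact absurd rfl (ne_of_gt ((List.pairwise_cons.1 hpair).1 w h))
    have hgt : ∀ u ∈ t, w > u := (List.pairwise_cons.1 hpair).1
    -- pointwise: for j ∈ nums, j ∉ (w::t) ↔ w < j
    have hpoint : ∀ j ∈ nums, ((!decide (j ∈ (w :: t))) = true ↔ decide (w < j) = true) := by
      intro j hj
      by_cases hmem : j ∈ (w :: t)
      · have hnlt : ¬ w < j := by
          rcases List.mem_cons.1 hmem with h | h
          · omega
          · have := hgt j h; omega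
        simp [hmem, hnlt]
      · have := hcompl j hj hmem w List.mem_cons_self
        simp [hmem, this]
    have hrw : r = gtCount nums w := by
      rw [hr, gtCount, List.countP_congr hpoint]
    simp only [List.foldl_cons, kbStep]
    rcases List.mem_cons.1 hv with hvw | hvt
    · subst hvw
      rw [loop_preserve cnt v t _ _ hwt, PySem.Dict.getD_insert]
      simp [hrw]
    · apply ih (g.insert w r) (r + cnt.getD w 0) (List.pairwise_cons.1 hpair).2
      · intro j hj hjt u hu
        by_cases hjw : j = w
        · subst hjw; exact hgt u hu
        · exact hcompl j hj (by simp [hjw, hjt]) u (List.mem_cons_of_mem _ hu)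
      · rw [hr, hcnt w]
        have := countP_cons_split nums w t hwt
        omega
      · exact hvt

-- the greater-dict B builds gives the strictly-greater count for every element of nums
theorem greater_getD (nums : List Int) (i : Int) (hi : i ∈ nums) :
    (((PySem.List.sorted (PySem.Dict.keys
          (nums.foldl (fun d x => d.insert x (d.getD x 0 + 1)) (PySem.Dict.empty : PySem.Dict Int Int)))
          (fun x => x) true).foldl
        (kbStep (nums.foldl (fun d x => d.insert x (d.getD x 0 + 1)) (PySem.Dict.empty : PySem.Dict Int Int)))
        (PySem.Dict.empty, (0 : Int))).1).getD i 0 = gtCount nums i := by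
  have hc : nums.foldl (fun d x => d.insert x (d.getD x 0 + 1)) PySem.Dict.empty
      = PySem.Dict.counter nums := PySem.Dict.foldl_insert_getD_add_one_eq_counter nums
  rw [hc]
  set ks := PySem.List.sorted (PySem.Dict.keys (PySem.Dict.counter nums)) (fun x => x) true with hks
  have hperm : ks.Perm (PySem.Dict.keys (PySem.Dict.counter nums)) := PySem.List.sorted_perm _ _ _
  have hmemks : ∀ j, j ∈ nums → j ∈ ks := by
    intro j hj
    rw [hks, PySem.List.mem_sorted, PySem.Dict.keys_counter, PySem.Set.mem_ofList]
    exact hj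
  have hnodup : ks.Nodup := hperm.symm.nodup (PySem.Dict.nodup_keys_counter nums)
  have hge : ks.Pairwise (fun a b => b ≤ a) := PySem.List.sorted_pairwise_rev _ _
  have hpair : ks.Pairwise (· > ·) := by
    exact (hge.and hnodup).imp (fun h => lt_of_le_of_ne h.1 (Ne.symm h.2))
  apply loop_main nums (PySem.Dict.counter nums)
    (fun v => PySem.Dict.getD_counter nums v) ks PySem.Dict.empty 0 hpair
  · intro j hj hjk
    exact absurd (hmemks j hj) hjk
  · have : nums.countP (fun j => !decide (j ∈ ks)) = 0 := by
      rw [List.countP_eq_zero]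
      intro j hj
      simp [hmemks j hj]
    rw [this]; rfl
  · exact hmemks i hi

-- A's rescanning count equals gtCount
theorem foldl_count_eq (nums : List Int) (i : Int) :
    nums.foldl (fun c j => if i < j then c + 1 else c) (0 : Int) = gtCount nums i := by
  rw [gtCount]
  induction nums using List.reverseRecOn with
  | nil => rfl
  | append_singleton xs x ih =>
    rw [List.foldl_append, List.countP_append]
    simp only [List.foldl_cons, List.foldl_nil, List.countP_cons, List.countP_nil]
    by_cases h : i < x <;> simp [ih] <;> omega

-- find? only looks at members
theorem find?_congr_mem {α : Type} (l : List α) (p q : α → Bool)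
    (h : ∀ x ∈ l, p x = q x) : l.find? p = l.find? q := by
  induction l with
  | nil => rfl
  | cons a l ih =>
    simp only [List.find?]
    rw [h a List.mem_cons_self]
    cases q a
    · exact ih (fun x hx => h x (List.mem_cons_of_mem _ hx))
    · rfl

-- ===== VERDICT (by name: the statement is the Claim_ definition above) =====
theorem kbig_spec : Claim_equal_kbig := by
  intro nums k _
  unfold Spec_kbig kbig kbig_alt
  rw [kbigGo_eq_find?]
  apply find?_congr_mem
  intro i hi
  exact congrArg (fun z => z == k - 1)
    ((foldl_count_eq nums i).trans (greater_getD nums i hi).symm)
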